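-- pv_equiv track=rewrite | github.com/Kevinbastin/patentdoc | generate_claims.py | create_fallback_elements_unlettered
-- ===== SOURCE A (Python) =====
-- def create_fallback_elements_unlettered(components: list) -> list:
--     """Create structured elements WITHOUT letters (a., b., c.)"""
--     elements = []
--
--     for i, comp in enumerate(components[:5]):
--         comp_clean = comp.strip()
--         if i == len(components[:5]) - 1:
--             # Last element
--             elements.append(f"{comp_clean} configured to perform operations related to the system.")
--         else:
--             elements.append(f"{comp_clean} configured to interact with the system;")
--
--     return elements
-- ===== SOURCE B (Python) =====
-- def create_fallback_elements_unlettered(components: list) -> list: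
--     """Create structured elements WITHOUT letters (a., b., c.)"""
--     def go(comps, slots):
--         if not comps or slots == 0:
--             return []
--         head, rest = comps[0], comps[1:]
--         if not rest or slots == 1:
--             return [head.strip() + " configured to perform operations related to the system."]
--         return [head.strip() + " configured to interact with the system;"] + go(rest, slots - 1)
--     return go(components, 5)
-- ===== Notes on version B (the rewrite author's own statement) =====
-- stated objective: alternative
-- what changed: Replaces the slice-then-indexed-loop (enumerate with a per-iteration last-index comparison) by a structural recursion over the list with a slot budget of 5: no slicing and no index arithmetic, the last element is recognized by lookahead (empty tail or last remaining slot) and the result is built head-first by recursive concatenation.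
import Mathlib
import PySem

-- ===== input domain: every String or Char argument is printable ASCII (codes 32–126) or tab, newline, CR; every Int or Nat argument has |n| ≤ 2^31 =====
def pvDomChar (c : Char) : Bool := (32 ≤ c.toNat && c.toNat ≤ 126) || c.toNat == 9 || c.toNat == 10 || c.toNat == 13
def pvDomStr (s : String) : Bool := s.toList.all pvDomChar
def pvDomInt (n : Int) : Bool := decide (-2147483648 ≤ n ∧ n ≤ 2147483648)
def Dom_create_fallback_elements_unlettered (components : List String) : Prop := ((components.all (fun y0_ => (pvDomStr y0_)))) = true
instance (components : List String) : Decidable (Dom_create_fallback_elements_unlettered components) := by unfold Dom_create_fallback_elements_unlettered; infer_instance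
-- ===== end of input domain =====

-- B replaces the slice + indexed loop by a slot-bounded structural recursion; objective: alternative decomposition of the same cost.

-- ===== PORT A =====
-- Port of A: indexed loop (enumerate) over components[:5], branching on whether i is the last index.
def create_fallback_elements_unlettered (components : List String) : List String :=
  (PySem.List.enumerate (PySem.List.slice components none (some 5))).foldl
    (fun elements p =>
      let comp_clean := PySem.Str.strip p.2
      if p.1 = ((PySem.List.slice components none (some 5)).length : Int) - 1 then
        elements ++ [comp_clean ++ " configured to perform operations related to the system."]
      else
        elements ++ [comp_clean ++ " configured to interact with the system;"]) []

-- ===== PORT B =====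
-- Port of B's helper go: structural recursion with a slot budget, last element by lookahead.
def cfeuAltGo : List String → Nat → List String
  | [], _ => []
  | _ :: _, 0 => []
  | head :: rest, Nat.succ n =>
    if rest = [] ∨ n = 0 then
      [PySem.Str.strip head ++ " configured to perform operations related to the system."]
    else
      (PySem.Str.strip head ++ " configured to interact with the system;") :: cfeuAltGo rest (Nat.succ n - 1)

def create_fallback_elements_unlettered_alt (components : List String) : List String :=
  cfeuAltGo components 5

-- ===== PRECONDITION & SPEC =====
def Spec_create_fallback_elements_unlettered (components : List String) (out : List String) : Prop := out = create_fallback_elements_unlettered_alt components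
instance (components : List String) (out : List String) : Decidable (Spec_create_fallback_elements_unlettered components out) := by unfold Spec_create_fallback_elements_unlettered; infer_instance

-- ===== CLAIM (what is proved, stated in full; the proofs are below) =====
def Claim_equal_create_fallback_elements_unlettered : Prop := ∀ (components : List String), Dom_create_fallback_elements_unlettered components → Spec_create_fallback_elements_unlettered components (create_fallback_elements_unlettered components)

-- ===== LEMMAS AND PROOFS =====

-- ===== VERDICT (by name: the statement is the Claim_ definition above) =====
theorem create_fallback_elements_unlettered_spec : Claim_equal_create_fallback_elements_unlettered := by
  intro components _
  unfold Spec_create_fallback_elements_unlettered create_fallback_elements_unlettered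
    create_fallback_elements_unlettered_alt
  rcases components with _ | ⟨a, _ | ⟨b, _ | ⟨c, _ | ⟨d, _ | ⟨e, rest⟩⟩⟩⟩⟩ <;>
    simp [PySem.List.slice, PySem.List.clampIdx, PySem.List.enumerate, cfeuAltGo]
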